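-- pv_equiv track=rewrite | github.com/emanlove/advent-of-code | 2022/solved/day8.py | combine_lr_with_ud
-- ===== SOURCE A (Python) =====
-- def combine_lr_with_ud(lr,ud):
--     lr_serialized = [t for r in lr for t in r]
--     ud_serialized = [None for _ in range(len(ud)*len(ud[0]))]
--     for r in range(len(ud)):
--         for c in range(len(ud[0])):
--             ud_serialized[r+(c*len(ud))] = ud[r][c]
--
--     lrud = list(zip(lr_serialized,ud_serialized))
--
--     return lrud
-- ===== SOURCE B (Python) =====
-- def combine_lr_with_ud(lr, ud):
--     R = len(ud)
--     total = R * len(ud[0])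
--     out = []
--     k = 0
--     for row in lr:
--         for t in row:
--             if k == total:
--                 return out
--             out.append((t, ud[k % R][k // R]))
--             k += 1
--     return out
-- ===== Notes on version B (the rewrite author's own statement) =====
-- stated objective: alternative
-- what changed: Instead of materializing both serialized lists and zipping them, B makes one streaming pass over lr with a position counter k, pairing each element on the fly with ud[k % R][k // R] (column-major address arithmetic) and returning early once k reaches R*C, so no intermediate flattened/scattered lists exist.
import Mathlib
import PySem

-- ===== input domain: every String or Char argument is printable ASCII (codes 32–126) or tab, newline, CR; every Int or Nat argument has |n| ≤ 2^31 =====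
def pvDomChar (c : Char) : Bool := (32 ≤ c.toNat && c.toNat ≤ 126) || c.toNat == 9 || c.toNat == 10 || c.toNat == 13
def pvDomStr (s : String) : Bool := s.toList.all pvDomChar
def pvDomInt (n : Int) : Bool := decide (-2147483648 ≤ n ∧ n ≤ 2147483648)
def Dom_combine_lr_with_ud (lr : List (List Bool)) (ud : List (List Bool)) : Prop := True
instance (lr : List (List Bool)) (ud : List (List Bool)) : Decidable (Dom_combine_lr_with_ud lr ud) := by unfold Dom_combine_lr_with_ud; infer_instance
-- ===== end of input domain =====

-- B streams over lr with a position counter, pairing each element with ud[k % R][k // R] on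
-- the fly and stopping at k = R*C, instead of building two serialized lists and zipping
-- (objective: alternative).

-- Reading ud[r][c] (nonnegative indices), shared by both ports; .getD is exact inside Pre_,
-- where every such read is in range (outside Pre_ the Python raises IndexError).
def pvRead (ud : List (List Bool)) (r c : Nat) : Bool :=
  (PySem.List.pyGet? ((PySem.List.pyGet? ud (r : Int)).getD []) (c : Int)).getD false

-- ===== PORT A =====
-- A preallocates a None-list of size len(ud)*len(ud[0]) and scatter-writes ud[r][c] to slot
-- r + c*len(ud); the None placeholder is modeled as `false` (inside Pre_ every slot is
-- overwritten, so this is exact there).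
def combine_lr_with_ud (lr : List (List Bool)) (ud : List (List Bool)) : List (Bool × Bool) :=
  let lr_serialized := lr.flatMap (fun r => r)
  let R := ud.length
  let C := ((PySem.List.pyGet? ud 0).getD []).length
  let ud_serialized :=
    (List.range R).foldl (fun acc r =>
      (List.range C).foldl (fun acc c =>
        acc.set (r + c * R) (pvRead ud r c)) acc)
      (List.replicate (R * C) false)
  lr_serialized.zip ud_serialized

-- ===== PORT B =====
-- B's inner loop over one row: appends (t, ud[k % R][k // R]) and increments k, with the
-- early return modeled by stopping when k = total.
def pvAltInner (ud : List (List Bool)) (R total : Nat) :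
    List Bool → Nat → List (Bool × Bool) × Nat
  | [], k => ([], k)
  | t :: ts, k =>
      if k = total then ([], k)
      else
        let p := pvAltInner ud R total ts (k + 1)
        ((t, pvRead ud (k % R) (k / R)) :: p.1, p.2)

-- B's outer loop over the rows of lr, threading the counter k.
def pvAltOuter (ud : List (List Bool)) (R total : Nat) :
    List (List Bool) → Nat → List (Bool × Bool)
  | [], _ => []
  | row :: rs, k =>
      let p := pvAltInner ud R total row k
      p.1 ++ pvAltOuter ud R total rs p.2

def combine_lr_with_ud_alt (lr : List (List Bool)) (ud : List (List Bool)) : List (Bool × Bool) :=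
  let R := ud.length
  let total := R * ((PySem.List.pyGet? ud 0).getD []).length
  pvAltOuter ud R total lr 0

-- ===== PRECONDITION & SPEC =====
-- Pre_ excludes exactly the inputs where the Python A raises IndexError: empty ud
-- (len(ud[0])) and a row of ud shorter than ud[0] (the read ud[r][c], c < len(ud[0])).
def Pre_combine_lr_with_ud (lr : List (List Bool)) (ud : List (List Bool)) : Prop :=
  ud ≠ [] ∧ ∀ row ∈ ud, (ud.headD []).length ≤ row.length
instance (lr : List (List Bool)) (ud : List (List Bool)) : Decidable (Pre_combine_lr_with_ud lr ud) := by unfold Pre_combine_lr_with_ud; infer_instance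
def pvWitness_combine_lr_with_ud : List (List Bool) × List (List Bool) :=
  ([[true, false]], [[false], [true]])
def Spec_combine_lr_with_ud (lr : List (List Bool)) (ud : List (List Bool)) (out : List (Bool × Bool)) : Prop := out = combine_lr_with_ud_alt lr ud
instance (lr : List (List Bool)) (ud : List (List Bool)) (out : List (Bool × Bool)) : Decidable (Spec_combine_lr_with_ud lr ud out) := by unfold Spec_combine_lr_with_ud; infer_instance

-- ===== CLAIM (what is proved, stated in full; the proofs are below) =====
def Claim_equal_combine_lr_with_ud : Prop := ∀ (lr : List (List Bool)) (ud : List (List Bool)), Dom_combine_lr_with_ud lr ud → Pre_combine_lr_with_ud lr ud → Spec_combine_lr_with_ud lr ud (combine_lr_with_ud lr ud)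

-- ===== LEMMAS AND PROOFS =====

-- A fold of `set`s preserves the length.
theorem pvFoldlSetLength {α β : Type} (p : β → Nat) (f : β → α) :
    ∀ (is : List β) (l : List α),
      (is.foldl (fun acc i => acc.set (p i) (f i)) l).length = l.length
  | [], _ => rfl
  | i :: is, l => by
      simp only [List.foldl_cons]
      rw [pvFoldlSetLength p f is]
      simp

-- A fold of `set`s that never touches slot k leaves slot k unchanged.
theorem pvFoldlSetMiss {α β : Type} (p : β → Nat) (f : β → α) :
    ∀ (is : List β) (l : List α) (k : Nat), (∀ i ∈ is, p i ≠ k) →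
      (is.foldl (fun acc i => acc.set (p i) (f i)) l)[k]? = l[k]?
  | [], _, _, _ => rfl
  | i :: is, l, k, h => by
      simp only [List.foldl_cons]
      rw [pvFoldlSetMiss p f is _ k (fun j hj => h j (List.mem_cons_of_mem _ hj))]
      exact List.getElem?_set_ne (h i List.mem_cons_self)

-- If slot k is written by i0 and never afterwards, it holds f i0 at the end.
theorem pvFoldlSetHit {α β : Type} (p : β → Nat) (f : β → α)
    (is1 is2 : List β) (i0 : β) (l : List α) (k : Nat)
    (hk : p i0 = k) (hlen : k < l.length) (h2 : ∀ i ∈ is2, p i ≠ k) :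
    ((is1 ++ i0 :: is2).foldl (fun acc i => acc.set (p i) (f i)) l)[k]? = some (f i0) := by
  rw [List.foldl_append, List.foldl_cons, pvFoldlSetMiss p f is2 _ k h2, hk]
  exact List.getElem?_set_self (by rw [pvFoldlSetLength]; exact hlen)

-- Element k of a flatMap whose chunks all have length R.
theorem pvFlatMapUniform {α γ : Type} (g : γ → List α) (R : Nat) (hR : 0 < R) :
    ∀ (cs : List γ), (∀ c ∈ cs, (g c).length = R) → ∀ k,
      (cs.flatMap g)[k]? = (cs[k / R]?).bind (fun c => (g c)[k % R]?)
  | [], _, k => by simp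
  | c :: cs, h, k => by
      have hc : (g c).length = R := h c List.mem_cons_self
      rw [List.flatMap_cons, List.getElem?_append, hc]
      by_cases hk : k < R
      · rw [if_pos hk, Nat.div_eq_of_lt hk, Nat.mod_eq_of_lt hk]
        simp
      · push_neg at hk
        obtain ⟨j, rfl⟩ : ∃ j, k = j + R := ⟨k - R, by omega⟩
        rw [if_neg (by omega), Nat.add_sub_cancel,
          pvFlatMapUniform g R hR cs (fun x hx => h x (List.mem_cons_of_mem _ hx)) j,
          Nat.add_div_right j hR, Nat.add_mod_right]
        simp

-- The scatter fill ud_serialized[r + c*R] = v r c equals the column-major flatten.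
theorem pvScatter {α : Type} (R C : Nat) (v : Nat → Nat → α) (d : α) :
    ((List.range R).foldl (fun acc r =>
        (List.range C).foldl (fun acc c => acc.set (r + c * R) (v r c)) acc)
      (List.replicate (R * C) d))
    = (List.range C).flatMap (fun c => (List.range R).map (fun r => v r c)) := by
  have hfold :
      ((List.range R).foldl (fun acc r =>
        (List.range C).foldl (fun acc c => acc.set (r + c * R) (v r c)) acc)
      (List.replicate (R * C) d))
      = (((List.range R).flatMap (fun r => (List.range C).map (fun c => (r, c)))).foldl
          (fun acc (rc : Nat × Nat) => acc.set (rc.1 + rc.2 * R) (v rc.1 rc.2))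
          (List.replicate (R * C) d)) := by
    rw [List.foldl_flatMap]
    simp [List.foldl_map]
  rw [hfold]
  have hlenL : (((List.range R).flatMap (fun r => (List.range C).map (fun c => (r, c)))).foldl
      (fun acc (rc : Nat × Nat) => acc.set (rc.1 + rc.2 * R) (v rc.1 rc.2))
      (List.replicate (R * C) d)).length = R * C := by
    rw [pvFoldlSetLength (fun rc : Nat × Nat => rc.1 + rc.2 * R) (fun rc => v rc.1 rc.2)]
    simp
  have hlenR : ((List.range C).flatMap (fun c => (List.range R).map (fun r => v r c))).length
      = C * R := by
    simp [List.length_flatMap, List.length_map, List.length_range, List.map_const',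
      List.sum_replicate, smul_eq_mul]
  apply List.ext_getElem?
  intro k
  by_cases hkin : k < R * C
  · have hR : 0 < R := by
      rcases Nat.eq_zero_or_pos R with h | h
      · rw [h, Nat.zero_mul] at hkin; omega
      · exact h
    have hr0 : k % R < R := Nat.mod_lt _ hR
    have hc0 : k / R < C := by
      by_contra h
      push_neg at h
      have h1 : C * R ≤ k / R * R := Nat.mul_le_mul_right R h
      have h2 : k / R * R ≤ k := Nat.div_mul_le_self k R
      have h3 : R * C = C * R := Nat.mul_comm R C
      omega
    set r0 := k % R with hr0def
    set c0 := k / R with hc0def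
    have hkeq : r0 + c0 * R = k := Nat.mod_add_div' k R
    have hrangeR : List.range R
        = List.range r0 ++ r0 :: (List.range (R - r0 - 1)).map (fun x => r0 + (x + 1)) := by
      have h1 : R = r0 + (R - r0) := by omega
      have h2 : R - r0 = (R - r0 - 1) + 1 := by omega
      rw [h1, List.range_add, h2, List.range_succ_eq_map]
      simp [List.map_map, Function.comp, Nat.succ_eq_add_one]
    have hrangeC : List.range C
        = List.range c0 ++ c0 :: (List.range (C - c0 - 1)).map (fun x => c0 + (x + 1)) := by
      have h1 : C = c0 + (C - c0) := by omega
      have h2 : C - c0 = (C - c0 - 1) + 1 := by omega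
      rw [h1, List.range_add, h2, List.range_succ_eq_map]
      simp [List.map_map, Function.comp, Nat.succ_eq_add_one]
    have hsplit : (List.range R).flatMap (fun r => (List.range C).map (fun c => (r, c)))
        = ((List.range r0).flatMap (fun r => (List.range C).map (fun c => (r, c)))
            ++ (List.range c0).map (fun c => (r0, c)))
          ++ (r0, c0)
            :: (((List.range (C - c0 - 1)).map (fun x => c0 + (x + 1))).map (fun c => (r0, c))
              ++ ((List.range (R - r0 - 1)).map (fun x => r0 + (x + 1))).flatMap
                  (fun r => (List.range C).map (fun c => (r, c)))) := by
      have hmid : (List.range C).map (fun c => ((r0 : Nat), c))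
          = (List.range c0).map (fun c => (r0, c)) ++ (r0, c0)
            :: ((List.range (C - c0 - 1)).map (fun x => c0 + (x + 1))).map
                (fun c => (r0, c)) := by
        rw [hrangeC]
        simp [List.map_append, List.map_map]
      conv_lhs => rw [hrangeR]
      rw [List.flatMap_append, List.flatMap_cons]
      simp only [hmid]
      simp [List.append_assoc, List.map_map]
    have hmiss : ∀ i ∈ (((List.range (C - c0 - 1)).map (fun x => c0 + (x + 1))).map
          (fun c => ((r0 : Nat), c))
        ++ ((List.range (R - r0 - 1)).map (fun x => r0 + (x + 1))).flatMap
            (fun r => (List.range C).map (fun c => (r, c)))),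
        i.1 + i.2 * R ≠ k := by
      intro i hi
      rcases List.mem_append.mp hi with hi | hi
      · simp only [List.mem_map, List.mem_range] at hi
        obtain ⟨c, ⟨x, hx, rfl⟩, rfl⟩ := hi
        have h1 : (c0 + 1) * R ≤ (c0 + (x + 1)) * R := Nat.mul_le_mul_right R (by omega)
        have h2 : (c0 + 1) * R = c0 * R + R := by ring
        simp only []
        omega
      · simp only [List.mem_flatMap, List.mem_map, List.mem_range] at hi
        obtain ⟨r, ⟨x, hx, rfl⟩, c, hc, rfl⟩ := hi
        intro hcontra
        have h1 : (r0 + (x + 1) + c * R) % R = (r0 + (x + 1)) % R :=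
          Nat.add_mul_mod_self_right _ _ _
        have h2 : (r0 + (x + 1)) % R = r0 + (x + 1) := Nat.mod_eq_of_lt (by omega)
        have h3 : k % R = r0 := rfl
        rw [hcontra] at h1
        omega
    have hL : (((List.range R).flatMap (fun r => (List.range C).map (fun c => (r, c)))).foldl
        (fun acc (rc : Nat × Nat) => acc.set (rc.1 + rc.2 * R) (v rc.1 rc.2))
        (List.replicate (R * C) d))[k]? = some (v r0 c0) := by
      rw [hsplit]
      exact pvFoldlSetHit (fun rc : Nat × Nat => rc.1 + rc.2 * R) (fun rc => v rc.1 rc.2)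
        _ _ (r0, c0) _ k hkeq (by simp [hkin]) hmiss
    have hRside : ((List.range C).flatMap (fun c => (List.range R).map (fun r => v r c)))[k]?
        = some (v r0 c0) := by
      rw [pvFlatMapUniform _ R hR _ (fun c _ => by simp) k, ← hr0def, ← hc0def,
        List.getElem?_range hc0]
      rw [Option.bind_some, List.getElem?_map, List.getElem?_range hr0]
      rfl
    rw [hL, hRside]
  · have h1 : R * C ≤ k := by omega
    rw [List.getElem?_eq_none (by rw [hlenL]; omega),
      List.getElem?_eq_none (by rw [hlenR, Nat.mul_comm]; omega)]

-- zip distributes over an append of the left list, shifting the right list.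
theorem pvZipAppend {α β : Type} :
    ∀ (a b : List α) (s : List β),
      (a ++ b).zip s = a.zip s ++ b.zip (s.drop a.length)
  | [], b, s => by simp
  | x :: a, b, [] => by simp
  | x :: a, b, y :: s => by
      simp only [List.cons_append, List.zip_cons_cons, List.length_cons, List.drop_succ_cons]
      rw [pvZipAppend a b s]

-- Dropping min m (S.length) is dropping m.
theorem pvDropMin {β : Type} (S : List β) (m : Nat) :
    S.drop (min m S.length) = S.drop m := by
  by_cases h : m ≤ S.length
  · rw [Nat.min_eq_left h]
  · rw [Nat.min_eq_right (by omega), List.drop_length,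
      List.drop_eq_nil_of_le (by omega)]

-- The inner loop produces row zipped against the tail of S from position k, and the new k.
theorem pvAltInnerEq (ud : List (List Bool)) (R : Nat) (S : List Bool)
    (hS : ∀ j, j < S.length → S[j]? = some (pvRead ud (j % R) (j / R))) :
    ∀ (row : List Bool) (k : Nat), k ≤ S.length →
      pvAltInner ud R S.length row k = (row.zip (S.drop k), min (k + row.length) S.length)
  | [], k, hkle => by
      simp [pvAltInner, Nat.min_eq_left hkle]
  | t :: ts, k, hkle => by
      by_cases hk : k = S.length
      · rw [pvAltInner, if_pos hk, hk, List.drop_length, List.zip_nil_right,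
          Nat.min_eq_right (by omega)]
      · have hlt : k < S.length := by omega
        have hdrop : S.drop k = S[k] :: S.drop (k + 1) := List.drop_eq_getElem_cons hlt
        have hval : S[k] = pvRead ud (k % R) (k / R) := by
          have := hS k hlt
          rw [List.getElem?_eq_getElem hlt] at this
          exact Option.some.inj this
        rw [pvAltInner, if_neg hk, pvAltInnerEq ud R S hS ts (k + 1) (by omega)]
        simp only [hdrop, hval, List.zip_cons_cons, List.length_cons]
        rw [show k + 1 + ts.length = k + (ts.length + 1) from by omega]

-- The outer loop is the zip of the flattened lr with S dropped at the counter.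
theorem pvAltOuterEq (ud : List (List Bool)) (R : Nat) (S : List Bool)
    (hS : ∀ j, j < S.length → S[j]? = some (pvRead ud (j % R) (j / R))) :
    ∀ (lr : List (List Bool)) (k : Nat), k ≤ S.length →
      pvAltOuter ud R S.length lr k = (lr.flatMap (fun r => r)).zip (S.drop k)
  | [], k, _ => by simp [pvAltOuter]
  | row :: rs, k, hkle => by
      rw [pvAltOuter, pvAltInnerEq ud R S hS row k hkle]
      simp only
      rw [pvAltOuterEq ud R S hS rs _ (Nat.min_le_right _ _), List.flatMap_cons,
        pvZipAppend row (rs.flatMap (fun r => r)) (S.drop k)]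
      have hdd : S.drop (min (k + row.length) S.length) = (S.drop k).drop row.length := by
        rw [pvDropMin, List.drop_drop]
      rw [hdd]

-- ===== VERDICT (by name: the statement is the Claim_ definition above) =====
theorem combine_lr_with_ud_spec : Claim_equal_combine_lr_with_ud := by
  intro lr ud _ hpre
  show combine_lr_with_ud lr ud = combine_lr_with_ud_alt lr ud
  obtain ⟨hne, -⟩ := hpre
  have hR : 0 < ud.length := List.length_pos_of_ne_nil hne
  unfold combine_lr_with_ud combine_lr_with_ud_alt
  simp only []
  set R := ud.length with hRdef
  set C := ((PySem.List.pyGet? ud 0).getD []).length with hCdef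
  set S := (List.range C).flatMap (fun c => (List.range R).map (fun r => pvRead ud r c))
    with hSdef
  have hSlen : S.length = R * C := by
    rw [hSdef]
    simp [List.length_flatMap, List.map_const', List.sum_replicate, smul_eq_mul,
      Nat.mul_comm]
  have hS : ∀ j, j < S.length → S[j]? = some (pvRead ud (j % R) (j / R)) := by
    intro j hj
    rw [hSlen] at hj
    have hc : j / R < C := Nat.div_lt_of_lt_mul (by omega)
    have hr : j % R < R := Nat.mod_lt _ hR
    rw [hSdef, pvFlatMapUniform _ R hR _ (fun c _ => by simp) j,
      List.getElem?_range hc, Option.bind_some, List.getElem?_map, List.getElem?_range hr]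
    rfl
  rw [pvScatter R C (fun r c => pvRead ud r c) false]
  have := pvAltOuterEq ud R S hS lr 0 (Nat.zero_le _)
  rw [hSlen] at this
  rw [this, List.drop_zero]
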